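-- pv_equiv track=rewrite | github.com/hexbee/agent-remote | gateway/config.py | _parse_unquoted_value
-- ===== SOURCE A (Python) =====
-- def _parse_unquoted_value(raw_value):
--     value_chars = []
--     index = 0
--
--     while index < len(raw_value):
--         char = raw_value[index]
--         if char == "#" and index > 0 and raw_value[index - 1].isspace():
--             break
--         value_chars.append(char)
--         index += 1
--
--     return "".join(value_chars).rstrip()
-- ===== SOURCE B (Python) =====
-- def _parse_unquoted_value(raw_value):
--     idx = raw_value.find("#")
--     while idx != -1:
--         if idx > 0 and raw_value[idx - 1].isspace():
--             return raw_value[:idx].rstrip()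
--         idx = raw_value.find("#", idx + 1)
--     return raw_value.rstrip()
-- ===== Notes on version B (the rewrite author's own statement) =====
-- stated objective: faster
-- what changed: Instead of accumulating characters one by one in a while loop with a break, B jumps between '#' occurrences with str.find and returns a slice raw_value[:idx].rstrip() at the first '#' preceded by whitespace, or raw_value.rstrip() if none qualifies.
import Mathlib
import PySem

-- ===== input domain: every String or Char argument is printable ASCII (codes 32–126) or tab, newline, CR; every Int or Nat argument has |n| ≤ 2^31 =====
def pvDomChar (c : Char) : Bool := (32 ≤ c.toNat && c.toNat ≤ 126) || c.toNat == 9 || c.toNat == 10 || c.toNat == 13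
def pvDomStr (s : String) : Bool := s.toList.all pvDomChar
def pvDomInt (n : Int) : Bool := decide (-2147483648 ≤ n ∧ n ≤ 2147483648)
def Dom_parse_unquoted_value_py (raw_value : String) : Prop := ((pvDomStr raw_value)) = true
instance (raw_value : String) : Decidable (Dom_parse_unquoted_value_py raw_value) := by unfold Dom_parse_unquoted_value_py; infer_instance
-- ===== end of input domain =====

-- B replaces A's per-character accumulating while loop by a str.find loop over '#'
-- occurrences that returns a slice; measurably faster (bulk find/slice vs per-char loop).

-- ===== PORT A =====
-- the while loop: scan index by index, collecting chars, break at a '#' preceded by whitespace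
def pvALoop (l : List Char) (acc : List Char) (index : Nat) : List Char :=
  if h : index < l.length then
    -- char = raw_value[index], inlined
    if l[index] == '#' && decide (0 < index) && PySem.Chars.isspace l[index - 1]! then acc
    else pvALoop l (acc ++ [l[index]]) (index + 1)
  else acc
termination_by l.length - index

def parse_unquoted_value_py (raw_value : String) : String :=
  String.ofList (PySem.Chars.rstrip (pvALoop raw_value.toList [] 0))

-- ===== PORT B =====
-- the find loop: idx runs over successive results of raw_value.find('#', …);
-- fuel = length + 1 only bounds the number of iterations (each find advances idx)
def pvBLoop (l : List Char) (fuel : Nat) (idx : Int) : List Char :=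
  match fuel with
  | 0 => []
  | f + 1 =>
    if idx == -1 then PySem.Chars.rstrip l
    else if decide (0 < idx) && PySem.Chars.isspace l[(idx - 1).toNat]! then
      PySem.Chars.rstrip (PySem.Chars.slice l none (some idx))
    else pvBLoop l f (PySem.Chars.findFrom l ['#'] (idx + 1) none)

def parse_unquoted_value_py_alt (raw_value : String) : String :=
  String.ofList (pvBLoop raw_value.toList (raw_value.toList.length + 1)
    (PySem.Chars.find raw_value.toList ['#']))

-- ===== PRECONDITION & SPEC =====
def Spec_parse_unquoted_value_py (raw_value : String) (out : String) : Prop := out = parse_unquoted_value_py_alt raw_value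
instance (raw_value : String) (out : String) : Decidable (Spec_parse_unquoted_value_py raw_value out) := by unfold Spec_parse_unquoted_value_py; infer_instance

-- ===== CLAIM (what is proved, stated in full; the proofs are below) =====
def Claim_equal_parse_unquoted_value_py : Prop := ∀ (raw_value : String), Dom_parse_unquoted_value_py raw_value → Spec_parse_unquoted_value_py raw_value (parse_unquoted_value_py raw_value)

-- ===== LEMMAS AND PROOFS =====

-- i is a cut position: a '#' preceded by whitespace
def pvQual (l : List Char) (i : Nat) : Bool :=
  decide (i < l.length) && l[i]! == '#' && decide (0 < i) && PySem.Chars.isspace l[i - 1]!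

theorem pvGetBang (l : List Char) (i : Nat) (h : i < l.length) : l[i]! = l[i] := by
  simp [List.getElem!_eq_getElem?_getD, List.getElem?_eq_getElem h]

theorem pvQual_iff (l : List Char) (i : Nat) : pvQual l i = true ↔
    i < l.length ∧ l[i]! = '#' ∧ 0 < i ∧ PySem.Chars.isspace l[i - 1]! = true := by
  simp [pvQual, Bool.and_eq_true, decide_eq_true_eq, beq_iff_eq]
  tauto

-- first cut position ≥ k, or l.length if none
def pvCut (l : List Char) (k : Nat) : Nat :=
  if h : k < l.length then
    if pvQual l k then k else pvCut l (k + 1)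
  else l.length
termination_by l.length - k

theorem pvCut_ge (l : List Char) (k : Nat) (hk : k ≤ l.length) : k ≤ pvCut l k := by
  rw [pvCut]
  split
  · split
    · exact le_refl k
    · exact le_trans (Nat.le_succ k) (pvCut_ge l (k + 1) (by omega))
  · omega
termination_by l.length - k

theorem pvCut_le (l : List Char) (k : Nat) : pvCut l k ≤ l.length := by
  rw [pvCut]
  split
  · split
    · omega
    · exact pvCut_le l (k + 1)
  · exact le_refl _
termination_by l.length - k

theorem pvCut_of_qual (l : List Char) (k : Nat) (h : k < l.length) (hq : pvQual l k = true) :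
    pvCut l k = k := by
  rw [pvCut]; simp [h, hq]

theorem pvCut_of_not_qual (l : List Char) (k : Nat) (h : k < l.length) (hq : pvQual l k = false) :
    pvCut l k = pvCut l (k + 1) := by
  rw [pvCut]; simp [h, hq]

theorem pvCut_len (l : List Char) (k : Nat) (h : l.length ≤ k) : pvCut l k = l.length := by
  rw [pvCut]; simp [Nat.not_lt.mpr h]

-- skipping a range of non-cut positions does not change the cut
theorem pvCut_skip (l : List Char) (k k' : Nat) (hk : k ≤ k') (hk' : k' ≤ l.length)
    (hno : ∀ i, k ≤ i → i < k' → pvQual l i = false) : pvCut l k = pvCut l k' := by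
  by_cases h : k = k'
  · rw [h]
  · have hlt : k < k' := lt_of_le_of_ne hk h
    have hkl : k < l.length := lt_of_lt_of_le hlt hk'
    rw [pvCut_of_not_qual l k hkl (hno k (le_refl k) hlt)]
    exact pvCut_skip l (k + 1) k' hlt hk' (fun i hi hi' => hno i (le_of_lt hi) hi')
termination_by k' - k

-- a singleton is a prefix of a drop iff that position holds the char
theorem pvPrefix_drop_iff (a : Char) (l : List Char) (i : Nat) :
    [a] <+: l.drop i ↔ l[i]? = some a := by
  constructor
  · intro h
    obtain ⟨t, ht⟩ := h
    have h0 : (l.drop i)[0]? = some a := by rw [← ht]; rfl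
    rw [List.getElem?_drop] at h0
    simpa using h0
  · intro h
    have hi : i < l.length := by
      by_contra hc
      simp [List.getElem?_eq_none (by omega : l.length ≤ i)] at h
    have hv : l[i] = a := by simpa [List.getElem?_eq_getElem hi] using h
    rw [List.drop_eq_getElem_cons hi, hv]
    exact ⟨l.drop (i + 1), rfl⟩

-- A's loop appends exactly the characters of l.take (pvCut l index) from index on
theorem pvALoop_eq (l : List Char) : ∀ n index acc, l.length - index ≤ n →
    pvALoop l acc index = acc ++ (l.take (pvCut l index)).drop index := by
  intro n
  induction n with
  | zero =>
    intro index acc hn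
    have hge : l.length ≤ index := by omega
    rw [pvALoop, dif_neg (by omega), pvCut_len l index hge]
    simp [List.drop_eq_nil_of_le, hge]
  | succ n ih =>
    intro index acc hn
    by_cases h : index < l.length
    · rw [pvALoop, dif_pos h]
      have hq : (l[index] == '#' && decide (0 < index) && PySem.Chars.isspace l[index - 1]!)
          = pvQual l index := by
        simp [pvQual, decide_eq_true h, pvGetBang l index h]
      rw [hq]
      by_cases hqq : pvQual l index = true
      · rw [if_pos hqq, pvCut_of_qual l index h hqq]
        simp [List.drop_eq_nil_of_le, List.length_take]
      · have hqf : pvQual l index = false := by simpa using hqq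
        rw [if_neg (by simp [hqf]), ih (index + 1) (acc ++ [l[index]]) (by omega)]
        rw [pvCut_of_not_qual l index h hqf]
        have hcutgt : index < pvCut l (index + 1) :=
          lt_of_lt_of_le (Nat.lt_succ_self index) (pvCut_ge l (index + 1) (by omega))
        have hcle : pvCut l (index + 1) ≤ l.length := pvCut_le l (index + 1)
        have hlen : index < (l.take (pvCut l (index + 1))).length := by
          simp [List.length_take]; omega
        rw [List.drop_eq_getElem_cons hlen]
        simp [List.getElem_take]
    · rw [pvALoop, dif_neg h, pvCut_len l index (by omega)]
      simp [List.drop_eq_nil_of_le, (by omega : l.length ≤ index)]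

-- B's loop from a find result at start k returns rstrip of l.take (pvCut l k)
theorem pvBLoop_eq (l : List Char) : ∀ f k, k ≤ l.length → l.length - k < f →
    pvBLoop l f (PySem.Chars.findFrom l ['#'] (k : Int) none)
      = PySem.Chars.rstrip (l.take (pvCut l k)) := by
  intro f
  induction f with
  | zero => intro k hk hf; omega
  | succ f ih =>
    intro k hk hf
    set j := PySem.Chars.findFrom l ['#'] (k : Int) none with hj
    by_cases hneg : j = -1
    · have hno : ¬ ['#'] <:+: l.drop k :=
        (PySem.Chars.findFrom_natCast_eq_neg_one_iff l ['#'] k hk).mp hneg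
      have hnoq : ∀ i, k ≤ i → i < l.length → pvQual l i = false := by
        intro i hki hil
        by_contra hc
        have hq : pvQual l i = true := by simpa using hc
        obtain ⟨_, hhash, _, _⟩ := (pvQual_iff l i).mp hq
        apply hno
        have hmem : '#' ∈ l.drop i := by
          rw [← hhash, pvGetBang l i hil, List.drop_eq_getElem_cons hil]
          exact List.mem_cons_self
        have hdd : l.drop i = (l.drop k).drop (i - k) := by
          rw [List.drop_drop]; congr 1; omega
        have hmem2 : '#' ∈ List.drop (i - k) (List.drop k l) := by rw [← hdd]; exact hmem
        have hmem' : '#' ∈ l.drop k := List.mem_of_mem_drop hmem2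
        obtain ⟨s, u, hsu⟩ := List.append_of_mem hmem'
        exact ⟨s, u, by simp [hsu]⟩
      have hcut : pvCut l k = l.length := by
        rw [pvCut_skip l k l.length hk (le_refl _) (fun i h1 h2 => hnoq i h1 h2)]
        exact pvCut_len l l.length (le_refl _)
      rw [pvBLoop, hneg]
      simp [hcut, List.take_length]
    · obtain ⟨hkj, hpre, hmin⟩ := PySem.Chars.findFrom_natCast_spec l ['#'] k hk hneg
      rw [← hj] at hkj hpre hmin
      have hgetj : l[j.toNat]? = some '#' := (pvPrefix_drop_iff '#' l j.toNat).mp hpre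
      have hjlen : j.toNat < l.length := by
        by_contra hc
        simp [List.getElem?_eq_none (by omega : l.length ≤ j.toNat)] at hgetj
      have hj0 : 0 ≤ j := le_trans (by exact_mod_cast Nat.zero_le k) hkj
      have hkj' : k ≤ j.toNat := by omega
      have hhash : l[j.toNat]! = '#' := by
        rw [pvGetBang l j.toNat hjlen]
        simpa [List.getElem?_eq_getElem hjlen] using hgetj
      have hnoq_between : ∀ i, k ≤ i → i < j.toNat → pvQual l i = false := by
        intro i h1 h2
        by_contra hc
        have hq : pvQual l i = true := by simpa using hc
        obtain ⟨hil, hih, _, _⟩ := (pvQual_iff l i).mp hq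
        apply hmin i (by exact_mod_cast h1) (by omega)
        rw [pvPrefix_drop_iff, ← hih, pvGetBang l i hil]
        simp [List.getElem?_eq_getElem hil]
      have hdec : decide (0 < j) = decide (0 < j.toNat) := decide_eq_decide.mpr (by omega)
      have hidx : (j - 1).toNat = j.toNat - 1 := by omega
      have hcond : (decide (0 < j) && PySem.Chars.isspace l[(j - 1).toNat]!) = pvQual l j.toNat := by
        rw [hdec, hidx]
        simp [pvQual, decide_eq_true hjlen, hhash]
      rw [pvBLoop, if_neg (by simpa using hneg), hcond]
      by_cases hq : pvQual l j.toNat = true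
      · rw [if_pos hq]
        have hcut : pvCut l k = j.toNat := by
          rw [pvCut_skip l k j.toNat hkj' (le_of_lt hjlen) hnoq_between]
          exact pvCut_of_qual l j.toNat hjlen hq
        rw [hcut]
        simp only [PySem.Chars.slice_eq_listSlice]
        rw [PySem.List.slice_to l hj0]
      · have hqf : pvQual l j.toNat = false := by simpa using hq
        rw [if_neg (by simp [hqf])]
        have hjj : j + 1 = ((j.toNat + 1 : Nat) : Int) := by omega
        rw [hjj, ih (j.toNat + 1) (by omega) (by omega)]
        congr 1
        rw [pvCut_skip l k (j.toNat + 1) (by omega) (by omega) (by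
          intro i h1 h2
          by_cases hij : i = j.toNat
          · rw [hij]; exact hqf
          · exact hnoq_between i h1 (by omega))]

-- ===== VERDICT (by name: the statement is the Claim_ definition above) =====
theorem parse_unquoted_value_py_spec : Claim_equal_parse_unquoted_value_py := by
  intro raw_value _
  unfold Spec_parse_unquoted_value_py parse_unquoted_value_py parse_unquoted_value_py_alt
  set l := raw_value.toList with hl
  rw [pvALoop_eq l (l.length) 0 [] (by omega)]
  rw [← PySem.Chars.findFrom_zero l ['#'],
      show (0 : Int) = ((0 : Nat) : Int) by norm_num,
      pvBLoop_eq l (l.length + 1) 0 (Nat.zero_le _) (by omega)]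
  simp
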